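-- pv_equiv track=rewrite | github.com/Andik252/DriveFileTools | DTS File Duplikat (Nama File)/script.py | find_duplicate_files
-- ===== SOURCE A (Python) =====
-- def find_duplicate_files(files):
--     """Mengelompokkan file dengan nama yang sama sebagai duplikat."""
--     duplicates = {}
--     for file in files:
--         name = file['name']
--         if name not in duplicates:
--             duplicates[name] = []
--         duplicates[name].append(file)
--     return {name: files for name, files in duplicates.items() if len(files) > 1}
-- ===== SOURCE B (Python) =====
-- def find_duplicate_files(files):
--     """Mengelompokkan file dengan nama yang sama sebagai duplikat."""
--     result = {}
--     seen = set()
--     for file in files: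
--         name = file['name']
--         if name not in seen:
--             seen.add(name)
--             group = [f for f in files if f['name'] == name]
--             if len(group) > 1:
--                 result[name] = group
--     return result
-- ===== Notes on version B (the rewrite author's own statement) =====
-- stated objective: alternative
-- what changed: A builds a name->list grouping dict in one pass and then filters groups by length; B keeps no grouping structure at all: it walks the list with a seen-set and, at each first occurrence of a name, rescans the entire list to collect that name's group, emitting it only if it has more than one member.
import Mathlib
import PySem

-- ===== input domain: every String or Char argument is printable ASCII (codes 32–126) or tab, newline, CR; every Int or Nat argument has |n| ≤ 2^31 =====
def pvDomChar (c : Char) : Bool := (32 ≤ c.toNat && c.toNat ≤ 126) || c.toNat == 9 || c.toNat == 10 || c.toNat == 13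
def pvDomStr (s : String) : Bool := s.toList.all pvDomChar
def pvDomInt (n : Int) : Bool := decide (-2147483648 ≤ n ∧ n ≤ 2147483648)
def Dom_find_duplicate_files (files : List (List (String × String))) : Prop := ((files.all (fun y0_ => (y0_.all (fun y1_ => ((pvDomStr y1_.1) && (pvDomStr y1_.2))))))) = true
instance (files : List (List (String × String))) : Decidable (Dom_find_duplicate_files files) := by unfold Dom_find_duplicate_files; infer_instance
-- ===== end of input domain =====

-- B replaces A's grouping dict + length post-filter by a seen-set walk that, at each first
-- occurrence of a name, rescans the whole list for that name's group (objective: alternative; not faster).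

-- ===== PORT A =====
-- file['name'] : first-match lookup in the dict `file` (none = KeyError, excluded by Pre_)
def pvName (file : List (String × String)) : Option String := (PySem.Dict.mk file).get? "name"

def find_duplicate_files (files : List (List (String × String))) : List (String × List (List (String × String))) :=
  let duplicates : PySem.Dict String (List (List (String × String))) :=
    files.foldl (fun duplicates file =>
      match pvName file with
      | some name =>
        let duplicates := if duplicates.contains name then duplicates else duplicates.insert name []
        duplicates.modify name [] (fun l => l ++ [file])
      | none => duplicates) PySem.Dict.empty
  duplicates.items.filter (fun p => p.2.length > 1)

-- ===== PORT B =====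
-- the inner comprehension's f['name'] == name: under Pre_ every f has a 'name' key, so the
-- Option equality `pvName f == some name` is exactly Python's comparison there
def find_duplicate_files_alt (files : List (List (String × String))) : List (String × List (List (String × String))) :=
  (files.foldl (fun (st : PySem.Set String × PySem.Dict String (List (List (String × String)))) file =>
    match pvName file with
    | some name =>
      if PySem.Set.contains st.1 name then st
      else
        let seen := PySem.Set.add st.1 name
        let group := files.filter (fun f => pvName f == some name)
        if group.length > 1 then (seen, st.2.insert name group) else (seen, st.2)
    | none => st) ((PySem.Set.empty : PySem.Set String), PySem.Dict.empty)).2.items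

-- ===== PRECONDITION & SPEC =====
-- Pre_ excludes exactly the files without a 'name' key, on which Python A raises KeyError.
def Pre_find_duplicate_files (files : List (List (String × String))) : Prop :=
  (files.all (fun file => (PySem.Dict.mk file).contains "name")) = true
instance (files : List (List (String × String))) : Decidable (Pre_find_duplicate_files files) := by unfold Pre_find_duplicate_files; infer_instance

def pvWitness_find_duplicate_files : (List (List (String × String))) :=
  [[("name", "a.txt"), ("path", "/x")], [("name", "a.txt")], [("name", "b.txt")]]

def Spec_find_duplicate_files (files : List (List (String × String))) (out : List (String × List (List (String × String)))) : Prop := out = find_duplicate_files_alt files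
instance (files : List (List (String × String))) (out : List (String × List (List (String × String)))) : Decidable (Spec_find_duplicate_files files out) := by unfold Spec_find_duplicate_files; infer_instance

-- ===== CLAIM (what is proved, stated in full; the proofs are below) =====
def Claim_equal_find_duplicate_files : Prop := ∀ (files : List (List (String × String))), Dom_find_duplicate_files files → Pre_find_duplicate_files files → Spec_find_duplicate_files files (find_duplicate_files files)

-- ===== LEMMAS AND PROOFS =====

-- the (name, file) pairs actually processed (those with a 'name' key)
def pvPairs (files : List (List (String × String))) : List (String × List (String × String)) :=
  files.filterMap (fun f => (pvName f).map (fun n => (n, f)))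

-- the group of a name, as B computes it
def pvGrp (files : List (List (String × String))) (k : String) : List (List (String × String)) :=
  files.filter (fun f => pvName f == some k)

-- the names of l not in `seen`, first occurrences in order (B's seen-set traversal)
def pvNew (names : List String) (seen : PySem.Set String) : List String :=
  match names with
  | [] => []
  | n :: ns => if PySem.Set.contains seen n then pvNew ns seen else n :: pvNew ns (PySem.Set.add seen n)

theorem pvSetContains {s : PySem.Set String} {x : String} :
    PySem.Set.contains s x = true ↔ x ∈ s := by
  simp [PySem.Set.contains_eq_listContains]

theorem pv_stepA_eq (d : PySem.Dict String (List (List (String × String)))) (k : String)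
    (f : List (String × String)) :
    (let d' := if d.contains k then d else d.insert k [];
     d'.modify k [] (fun v => v ++ [f])) = d.modify k [] (fun v => v ++ [f]) := by
  by_cases h : d.contains k = true
  · simp [h]
  · simp only [Bool.not_eq_true] at h
    simp only [h, Bool.false_eq_true, ite_false]
    unfold PySem.Dict.modify
    rw [PySem.Dict.getD_insert_self, PySem.Dict.insert_insert_self,
        PySem.Dict.getD_of_not_contains _ _ h]

theorem pv_foldA_eq (files : List (List (String × String)))
    (d : PySem.Dict String (List (List (String × String)))) :
    files.foldl (fun duplicates file =>
      match pvName file with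
      | some name =>
        let duplicates := if duplicates.contains name then duplicates else duplicates.insert name []
        duplicates.modify name [] (fun l => l ++ [file])
      | none => duplicates) d
    = (pvPairs files).foldl (fun d p => d.modify p.1 [] (fun v => v ++ [p.2])) d := by
  induction files generalizing d with
  | nil => rfl
  | cons f fs ih =>
    simp only [List.foldl_cons, pvPairs, List.filterMap_cons]
    cases h : pvName f with
    | none => simpa [pvPairs] using ih d
    | some n =>
      simp only [Option.map_some]
      rw [ih]
      simp only [pvPairs, List.foldl_cons]
      rw [pv_stepA_eq]

-- B's group = the projection of the matching pairs
theorem pv_grp_eq (files : List (List (String × String))) (k : String) :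
    pvGrp files k = ((pvPairs files).filter (fun p => p.1 == k)).map (fun p => p.2) := by
  induction files with
  | nil => rfl
  | cons f fs ih =>
    simp only [pvGrp, pvPairs, List.filter_cons, List.filterMap_cons] at ih ⊢
    cases h : pvName f with
    | none => simpa [h] using ih
    | some n =>
      by_cases hk : n = k
      · subst hk; simp [ih]
      · simp [hk, ih]

-- pvNew = ofList minus the already-seen names
theorem pv_new_eq (names : List String) (seen : PySem.Set String) :
    pvNew names seen
      = (PySem.Set.ofList names).filter (fun y => !(PySem.Set.contains seen y)) := by
  induction names generalizing seen with
  | nil => rfl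
  | cons n ns ih =>
    rw [PySem.Set.ofList_cons]
    unfold pvNew
    by_cases h : PySem.Set.contains seen n = true
    · simp only [h, ite_true, List.filter_cons, Bool.not_true, Bool.false_eq_true, ite_false]
      rw [ih]
      show _ = List.filter _ (List.filter (fun y => !(y == n)) _)
      rw [List.filter_filter]
      refine List.filter_congr (fun y _ => ?_)
      cases hyn : y == n with
      | true =>
        have hy : y = n := eq_of_beq hyn
        subst hy
        simp [pvSetContains.mp h]
      | false => simp
    · simp only [Bool.not_eq_true] at h
      simp only [h, Bool.false_eq_true, ite_false, List.filter_cons, Bool.not_false, ite_true]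
      rw [ih]
      refine congrArg (n :: ·) ?_
      show List.filter _ _ = List.filter _ (List.filter (fun y => !(y == n)) _)
      rw [List.filter_filter]
      refine List.filter_congr (fun y _ => ?_)
      have hadd : PySem.Set.contains (PySem.Set.add seen n) y
          = ((y == n) || PySem.Set.contains seen y) := by
        cases hyn : y == n with
        | true =>
          have hy : y = n := eq_of_beq hyn
          subst hy
          simp [PySem.Set.mem_add]
        | false =>
          have hy : y ≠ n := fun he => by simp [he] at hyn
          simp only [Bool.false_or]
          cases hc : PySem.Set.contains seen y with
          | true =>
            exact pvSetContains.mpr (PySem.Set.mem_add _ _ _ |>.mpr (Or.inl (pvSetContains.mp hc)))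
          | false =>
            cases hc' : PySem.Set.contains (PySem.Set.add seen n) y with
            | false => rfl
            | true =>
              rcases (PySem.Set.mem_add _ _ _).mp (pvSetContains.mp hc') with hm | he
              · rw [pvSetContains.mpr hm] at hc; exact hc
              · exact absurd he hy
      rw [hadd]
      cases hyn : y == n <;> simp

-- B's fold, characterised: it appends the qualifying unseen names' groups to the result
theorem pv_foldB_eq (files l : List (List (String × String))) (seen : PySem.Set String)
    (res : PySem.Dict String (List (List (String × String))))
    (hinv : ∀ k, res.contains k = true → PySem.Set.contains seen k = true) :
    (l.foldl (fun (st : PySem.Set String × PySem.Dict String (List (List (String × String)))) file =>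
      match pvName file with
      | some name =>
        if PySem.Set.contains st.1 name then st
        else
          let seen := PySem.Set.add st.1 name
          let group := files.filter (fun f => pvName f == some name)
          if group.length > 1 then (seen, st.2.insert name group) else (seen, st.2)
      | none => st) (seen, res)).2.items
    = res.items
      ++ ((pvNew ((pvPairs l).map Prod.fst) seen).filter
            (fun k => decide ((pvGrp files k).length > 1))).map
          (fun k => (k, pvGrp files k)) := by
  induction l generalizing seen res with
  | nil => simp [pvPairs, pvNew]
  | cons f fs ih =>
    simp only [List.foldl_cons, pvPairs, List.filterMap_cons]
    cases h : pvName f with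
    | none =>
      simpa [pvPairs] using ih seen res hinv
    | some n =>
      simp only [Option.map_some, List.map_cons]
      by_cases hs : PySem.Set.contains seen n = true
      · simp only [hs, ite_true]
        rw [ih seen res hinv]
        simp only [pvNew, hs, ite_true, pvPairs]
      · simp only [Bool.not_eq_true] at hs
        simp only [hs, Bool.false_eq_true, ite_false]
        have hres : res.contains n = false := by
          cases hc : res.contains n with
          | false => rfl
          | true => rw [hinv n hc] at hs; exact absurd hs (by simp)
        by_cases hg : (files.filter (fun f => pvName f == some n)).length > 1
        · simp only [hg, ite_true]
          have hinv' : ∀ k, (res.insert n (files.filter (fun f => pvName f == some n))).contains k = true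
              → PySem.Set.contains (PySem.Set.add seen n) k = true := by
            intro k hk
            rw [PySem.Dict.contains_insert] at hk
            cases hkn : k == n with
            | true =>
              have hk' : k = n := eq_of_beq hkn
              subst hk'
              exact pvSetContains.mpr ((PySem.Set.mem_add _ _ _).mpr (Or.inr rfl))
            | false =>
              rw [hkn, Bool.false_or] at hk
              exact pvSetContains.mpr
                ((PySem.Set.mem_add _ _ _).mpr (Or.inl (pvSetContains.mp (hinv k hk))))
          rw [ih (PySem.Set.add seen n) _ hinv']
          rw [PySem.Dict.items_insert_of_not_contains _ _ hres]
          simp only [pvNew, hs, Bool.false_eq_true, ite_false, List.filter_cons, pvPairs]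
          simp [pvGrp, hg]
        · simp only [hg, ite_false]
          have hinv' : ∀ k, res.contains k = true → PySem.Set.contains (PySem.Set.add seen n) k = true := by
            intro k hk
            exact pvSetContains.mpr
              ((PySem.Set.mem_add _ _ _).mpr (Or.inl (pvSetContains.mp (hinv k hk))))
          rw [ih (PySem.Set.add seen n) res hinv']
          simp only [pvNew, hs, Bool.false_eq_true, ite_false, List.filter_cons, pvPairs]
          have hd : decide ((pvGrp files n).length > 1) = false := by
            simpa [pvGrp] using hg
          simp [hd]

-- A's grouping dict, read off: items are the distinct names with their groups
theorem pv_A_items (files : List (List (String × String))) :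
    ((pvPairs files).foldl (fun d p => d.modify p.1 [] (fun v => v ++ [p.2]))
        (PySem.Dict.empty : PySem.Dict String (List (List (String × String))))).items
    = (PySem.Set.ofList ((pvPairs files).map Prod.fst)).map
        (fun k => (k, ((pvPairs files).filter (fun p => p.1 == k)).map (fun p => p.2))) := by
  set pl := pvPairs files with hpl
  have hgrp : ∀ k, ((pl.foldl (fun d p => d.modify p.1 [] (fun v => v ++ [p.2]))
      (PySem.Dict.empty : PySem.Dict String (List (List (String × String))))).getD k [])
        = ((pl.filter (fun p => p.1 == k)).map (fun x => x.2)) := by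
    intro k
    rw [PySem.Dict.getD_foldl_modify_append, PySem.Dict.getD_empty, List.nil_append]
  have hnodup : (pl.foldl (fun d p => d.modify p.1 [] (fun v => v ++ [p.2]))
      (PySem.Dict.empty : PySem.Dict String (List (List (String × String))))).keys.Nodup :=
    PySem.Dict.nodup_keys_foldl_modify_key pl Prod.fst [] _ _ PySem.Dict.nodup_keys_empty
  have hkeys : (pl.foldl (fun d p => d.modify p.1 [] (fun v => v ++ [p.2]))
      (PySem.Dict.empty : PySem.Dict String (List (List (String × String))))).keys
        = PySem.Set.ofList (pl.map Prod.fst) := by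
    rw [PySem.Dict.keys_foldl_modify_key pl Prod.fst [] (fun _ p => fun v => v ++ [p.2]),
        PySem.Dict.keys_empty, PySem.Set.update_nil_left]
  rw [PySem.Dict.items_eq_map_keys _ hnodup [], hkeys]
  exact List.map_congr_left (fun k _ => by rw [hgrp k])

-- ===== VERDICT (by name: the statement is the Claim_ definition above) =====
theorem find_duplicate_files_spec : Claim_equal_find_duplicate_files := by
  intro files _ _
  unfold Spec_find_duplicate_files
  show find_duplicate_files files = find_duplicate_files_alt files
  unfold find_duplicate_files find_duplicate_files_alt
  simp only [pv_foldA_eq]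
  rw [pv_foldB_eq files files PySem.Set.empty PySem.Dict.empty
      (fun k hk => by simp [PySem.Dict.contains_empty] at hk)]
  simp only [pv_A_items, List.filter_map]
  have hempty : (fun y => !(PySem.Set.contains (PySem.Set.empty : PySem.Set String) y))
      = (fun _ => true) := by
    funext y; rfl
  rw [pv_new_eq, hempty, List.filter_true]
  rw [show (PySem.Dict.empty : PySem.Dict String (List (List (String × String)))).items = [] from rfl,
      List.nil_append]
  have hfun : (fun k => (k, ((pvPairs files).filter (fun p => p.1 == k)).map (fun p => p.2)))
      = (fun k : String => (k, pvGrp files k)) := by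
    funext k; rw [pv_grp_eq]
  rw [hfun]
  exact congrArg _ (List.filter_congr (fun k _ => rfl))
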